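-- pv_equiv track=rewrite | github.com/EKiritsugu/Blind-Source-Separation | ICAProject/randomMixedSignal.py | signalThree
-- ===== SOURCE A (Python) =====
-- def signalThree(dimention):
--     c=[]
--     for s in range(dimention):
--         if (s%23)<13:
--             p=1
--         else:
--             p=0
--         c.append(p)
--     return c
-- ===== SOURCE B (Python) =====
-- def signalThree(dimention):
--     if dimention <= 0:
--         return []
--     block = [1] * 13 + [0] * 10
--     full, rem = divmod(dimention, 23)
--     return block * full + block[:rem]
-- ===== Notes on version B (the rewrite author's own statement) =====
-- stated objective: faster
-- what changed: Replaces the per-element loop with a per-index modulo test by tiling a precomputed period-23 block: block*full + block[:rem] from one divmod.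
import Mathlib
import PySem

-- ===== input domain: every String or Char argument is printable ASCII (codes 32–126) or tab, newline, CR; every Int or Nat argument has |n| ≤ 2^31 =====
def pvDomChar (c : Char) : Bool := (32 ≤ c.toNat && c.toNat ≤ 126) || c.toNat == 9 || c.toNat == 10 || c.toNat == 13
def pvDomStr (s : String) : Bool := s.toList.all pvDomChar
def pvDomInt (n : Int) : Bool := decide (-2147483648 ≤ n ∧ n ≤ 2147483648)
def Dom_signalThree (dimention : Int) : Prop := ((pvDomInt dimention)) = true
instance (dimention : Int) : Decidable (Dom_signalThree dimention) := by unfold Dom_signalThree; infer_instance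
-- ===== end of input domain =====

-- B replaces A's per-element modulo loop by tiling a precomputed period-23 block (constant-factor speedup; return value only).

-- ===== PORT A =====
def signalThree (dimention : Int) : List Int :=
  (PySem.List.pyRange 0 dimention 1).foldl
    (fun c s => c ++ [if PySem.Int.mod s 23 < 13 then (1 : Int) else 0]) []

-- ===== PORT B =====
def signalThree_alt (dimention : Int) : List Int :=
  if dimention ≤ 0 then []
  else
    let block : List Int := List.replicate 13 1 ++ List.replicate 10 0
    let full := PySem.Int.floordiv dimention 23
    let rem := PySem.Int.mod dimention 23
    (List.replicate full.toNat block).flatten ++ block.take rem.toNat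

-- ===== PRECONDITION & SPEC =====
def Spec_signalThree (dimention : Int) (out : List Int) : Prop := out = signalThree_alt dimention
instance (dimention : Int) (out : List Int) : Decidable (Spec_signalThree dimention out) := by unfold Spec_signalThree; infer_instance

-- ===== CLAIM (what is proved, stated in full; the proofs are below) =====
def Claim_equal_signalThree : Prop := ∀ (dimention : Int), Dom_signalThree dimention → Spec_signalThree dimention (signalThree dimention)

-- ===== LEMMAS AND PROOFS =====

def pvBlock : List Int := List.replicate 13 1 ++ List.replicate 10 0

theorem pvBlock_eq_map : pvBlock = (List.range 23).map (fun k => if k < 13 then (1 : Int) else 0) := by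
  decide

theorem pvBlock_take_succ (m : Nat) (hm : m < 23) :
    pvBlock.take (m + 1) = pvBlock.take m ++ [if m < 13 then (1 : Int) else 0] := by
  rw [pvBlock_eq_map, ← List.map_take, ← List.map_take, List.take_range, List.take_range,
    Nat.min_eq_left (by omega), Nat.min_eq_left (by omega), List.range_succ, List.map_append]
  simp

theorem pvTile (n : Nat) :
    (List.range n).map (fun k => if k % 23 < 13 then (1 : Int) else 0) =
      (List.replicate (n / 23) pvBlock).flatten ++ pvBlock.take (n % 23) := by
  induction n with
  | zero => simp
  | succ n ih =>
    rw [List.range_succ, List.map_append, ih]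
    by_cases h : n % 23 = 22
    · have hq : (n + 1) / 23 = n / 23 + 1 := by omega
      have hr : (n + 1) % 23 = 0 := by omega
      have tk : pvBlock.take 22 ++ [if (22 : Nat) < 13 then (1 : Int) else 0] = pvBlock := by
        decide
      rw [hq, hr, List.replicate_succ', List.flatten_append, List.append_assoc]
      simp only [List.map_cons, List.map_nil, h]
      rw [tk]
      simp
    · have hq : (n + 1) / 23 = n / 23 := by omega
      have hr : (n + 1) % 23 = n % 23 + 1 := by omega
      rw [hq, hr, pvBlock_take_succ (n % 23) (by omega)]
      simp

theorem pvMod_natCast (k : Nat) : PySem.Int.mod (k : Int) 23 = ((k % 23 : Nat) : Int) := by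
  exact_mod_cast PySem.Int.mod_natCast k 23

theorem pvFloordiv_natCast (k : Nat) : PySem.Int.floordiv (k : Int) 23 = ((k / 23 : Nat) : Int) := by
  exact_mod_cast PySem.Int.floordiv_natCast k 23

-- ===== VERDICT (by name: the statement is the Claim_ definition above) =====
theorem signalThree_spec : Claim_equal_signalThree := by
  intro d _
  unfold Spec_signalThree signalThree signalThree_alt
  rw [PySem.List.foldl_append_singleton_eq_map, List.nil_append]
  by_cases hd : d ≤ 0
  · simp [if_pos hd, PySem.List.pyRange_one_eq_nil hd]
  · rw [if_neg hd]
    obtain ⟨n, rfl⟩ : ∃ n : Nat, d = (n : Int) :=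
      ⟨d.toNat, (Int.toNat_of_nonneg (le_of_lt (lt_of_not_ge hd))).symm⟩
    rw [PySem.List.pyRange_one, Int.sub_zero, Int.toNat_natCast, List.map_map]
    have hmap : ∀ k : Nat, k ∈ List.range n →
        ((fun s => if PySem.Int.mod s 23 < 13 then (1 : Int) else 0) ∘ fun k : Nat => (0 : Int) + (k : Int)) k =
          (fun k : Nat => if k % 23 < 13 then (1 : Int) else 0) k := by
      intro k _
      simp only [Function.comp, zero_add, pvMod_natCast]
      by_cases h : k % 23 < 13
      · rw [if_pos h, if_pos (by exact_mod_cast h)]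
      · rw [if_neg h, if_neg (by exact_mod_cast h)]
    rw [List.map_congr_left hmap, pvTile]
    show _ = (List.replicate (PySem.Int.floordiv ((n : Nat) : Int) 23).toNat pvBlock).flatten ++
      List.take (PySem.Int.mod ((n : Nat) : Int) 23).toNat pvBlock
    rw [pvMod_natCast, pvFloordiv_natCast, Int.toNat_natCast, Int.toNat_natCast]
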